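-- pv_equiv track=rewrite | github.com/robertmoga/PythonDraw | PyDraw/dev/data_processing.py | get_bounds_variable
-- ===== SOURCE A (Python) =====
-- def get_bounds_variable(white_values):
--
--     bounds = list()
--     index = -1
--
--     def trigger(pos, vec):
--         count = 0
--         for i in range(pos, len(vec) - 1):
--             if abs(vec[i] - vec[i + 1]) > 4:
--                 return count
--             count += 1
--
--         return -1
--
--     for i in range(len(white_values) - 1):
--         if index > -1 and i < index:
--             continue
--
--         if (white_values[i] < 10 and white_values[i] > 0) and \
--                 (white_values[i + 1] < 10 and white_values[i + 1] > 0):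
--             if abs(white_values[i] - white_values[i + 1]) < 10:
--
--                 count = trigger(i, white_values)
--                 if count != -1:
--                     bounds.append(int(count / 2 + i))
--                     index = i + count
--
--     return bounds
-- ===== SOURCE B (Python) =====
-- def get_bounds_variable(white_values):
--     n = len(white_values)
--     # next_jump[i] = smallest j >= i with |v[j]-v[j+1]| > 4, or None; one backward pass
--     next_jump = []
--     nxt = None
--     for j in range(n - 2, -1, -1):
--         if abs(white_values[j] - white_values[j + 1]) > 4:
--             nxt = j
--         next_jump.append(nxt)
--     next_jump.reverse()
--     bounds = []
--     index = -1
--     for i in range(n - 1):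
--         if i < index:
--             continue
--         if 0 < white_values[i] < 10 and 0 < white_values[i + 1] < 10:
--             j = next_jump[i]
--             if j is not None:
--                 count = j - i
--                 bounds.append(i + count // 2)
--                 index = i + count
--     return bounds
-- ===== Notes on version B (the rewrite author's own statement) =====
-- stated objective: alternative
-- what changed: A's per-candidate inner trigger() rescan of the suffix is replaced by a next-big-jump suffix array built in one backward pass and read per candidate; the redundant |v[i]-v[i+1]|<10 check (implied by both values lying in 1..9) is dropped.
import Mathlib
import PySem

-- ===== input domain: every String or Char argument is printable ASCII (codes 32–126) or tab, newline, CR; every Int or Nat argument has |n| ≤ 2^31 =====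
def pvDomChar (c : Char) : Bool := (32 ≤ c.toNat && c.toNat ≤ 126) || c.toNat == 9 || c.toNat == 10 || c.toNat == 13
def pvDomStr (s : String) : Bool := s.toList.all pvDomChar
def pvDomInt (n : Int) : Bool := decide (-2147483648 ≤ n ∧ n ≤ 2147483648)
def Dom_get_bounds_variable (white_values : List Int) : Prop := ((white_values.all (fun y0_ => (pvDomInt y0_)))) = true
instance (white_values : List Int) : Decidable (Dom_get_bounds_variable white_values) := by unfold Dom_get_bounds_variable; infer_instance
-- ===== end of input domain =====

-- B replaces A's per-candidate inner trigger() rescan of the suffix by a next-big-jump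
-- suffix array built in one backward pass and read per candidate (alternative strategy).

-- ===== PORT A =====
-- trigger(pos, vec): iterate i over range(pos, len(vec)-1); all indices i, i+1 are in
-- range there, so pyGetD's default 0 is never read (exact).
def triggerGBV (vec : List Int) : List Int → Int → Int
  | [], _ => -1
  | i :: rest, count =>
    if 4 < |PySem.List.pyGetD vec i 0 - PySem.List.pyGetD vec (i+1) 0| then count
    else triggerGBV vec rest (count + 1)

-- int(count / 2 + i): count ≥ 0 and i ≥ 0 whenever executed, so the float truncation is
-- floor: ported as floordiv count 2 + i (exact while count/2 + i < 2^53).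
def get_bounds_variable (white_values : List Int) : List Int :=
  ((PySem.List.pyRange 0 ((white_values.length : Int) - 1) 1).foldl
    (fun (st : Int × List Int) i =>
      if st.1 > -1 ∧ i < st.1 then st
      else
        if (PySem.List.pyGetD white_values i 0 < 10 ∧ 0 < PySem.List.pyGetD white_values i 0) ∧
           (PySem.List.pyGetD white_values (i+1) 0 < 10 ∧ 0 < PySem.List.pyGetD white_values (i+1) 0) then
          if |PySem.List.pyGetD white_values i 0 - PySem.List.pyGetD white_values (i+1) 0| < 10 then
            let count := triggerGBV white_values
              (PySem.List.pyRange i ((white_values.length : Int) - 1) 1) 0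
            if count ≠ -1 then (i + count, st.2 ++ [PySem.Int.floordiv count 2 + i])
            else st
          else st
        else st)
    (-1, ([] : List Int))).2

-- ===== PORT B =====
-- next_jump is built by appending during the backward pass and then reversed; the forward
-- scan reads next_jump[i] with 0 ≤ i < n-1, always in range, so pyGetD's default is never read.
def get_bounds_variable_alt (white_values : List Int) : List Int :=
  let n : Int := (white_values.length : Int)
  let nbRev := (PySem.List.pyRange (n - 2) (-1) (-1)).foldl
    (fun (st : Option Int × List (Option Int)) j =>
      let nxt := if 4 < |PySem.List.pyGetD white_values j 0 - PySem.List.pyGetD white_values (j+1) 0|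
                 then some j else st.1
      (nxt, st.2 ++ [nxt]))
    (none, ([] : List (Option Int)))
  let nb := nbRev.2.reverse
  ((PySem.List.pyRange 0 (n - 1) 1).foldl
    (fun (st : Int × List Int) i =>
      if i < st.1 then st
      else
        if 0 < PySem.List.pyGetD white_values i 0 ∧ PySem.List.pyGetD white_values i 0 < 10 ∧
           0 < PySem.List.pyGetD white_values (i+1) 0 ∧ PySem.List.pyGetD white_values (i+1) 0 < 10 then
          match PySem.List.pyGetD nb i none with
          | some j => (i + (j - i), st.2 ++ [i + PySem.Int.floordiv (j - i) 2])
          | none => st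
        else st)
    (-1, ([] : List Int))).2

-- ===== PRECONDITION & SPEC =====
def Spec_get_bounds_variable (white_values : List Int) (out : List Int) : Prop := out = get_bounds_variable_alt white_values
instance (white_values : List Int) (out : List Int) : Decidable (Spec_get_bounds_variable white_values out) := by unfold Spec_get_bounds_variable; infer_instance

-- ===== CLAIM (what is proved, stated in full; the proofs are below) =====
def Claim_equal_get_bounds_variable : Prop := ∀ (white_values : List Int), Dom_get_bounds_variable white_values → Spec_get_bounds_variable white_values (get_bounds_variable white_values)

-- ===== LEMMAS AND PROOFS =====

-- "there is a big jump at position j"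
def jmpb (vec : List Int) (j : Int) : Bool :=
  decide (4 < |PySem.List.pyGetD vec j 0 - PySem.List.pyGetD vec (j+1) 0|)

-- first big-jump position in [i, c)
def fjump (vec : List Int) (i c : Int) : Option Int :=
  (PySem.List.pyRange i c 1).find? (jmpb vec)

theorem fjump_nil (vec : List Int) {i c : Int} (h : c ≤ i) : fjump vec i c = none := by
  simp [fjump, PySem.List.pyRange_one_eq_nil h]

theorem fjump_cons (vec : List Int) {i c : Int} (h : i < c) :
    fjump vec i c = if jmpb vec i then some i else fjump vec (i+1) c := by
  rw [fjump, PySem.List.pyRange_one_cons h, List.find?_cons]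
  by_cases hj : jmpb vec i = true <;> simp [hj, fjump]

theorem fjump_ge (vec : List Int) {i c j : Int} (h : fjump vec i c = some j) : i ≤ j := by
  have := List.mem_of_find?_eq_some h
  exact (PySem.List.mem_pyRange_one.mp this).1

theorem trig_eq (vec : List Int) :
    ∀ (k : Nat) (i c count : Int), (c - i).toNat = k →
    triggerGBV vec (PySem.List.pyRange i c 1) count =
      (match fjump vec i c with
       | some j => count + (j - i)
       | none => -1) := by
  intro k
  induction k with
  | zero =>
    intro i c count hk
    have hci : c ≤ i := by omega
    rw [PySem.List.pyRange_one_eq_nil hci, fjump_nil vec hci]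
    rfl
  | succ k ih =>
    intro i c count hk
    have hic : i < c := by omega
    rw [PySem.List.pyRange_one_cons hic, fjump_cons vec hic]
    by_cases hj : jmpb vec i = true
    · have h4 : 4 < |PySem.List.pyGetD vec i 0 - PySem.List.pyGetD vec (i+1) 0| := by
        simpa [jmpb] using hj
      simp [triggerGBV, h4, hj]
    · have h4 : ¬ 4 < |PySem.List.pyGetD vec i 0 - PySem.List.pyGetD vec (i+1) 0| := by
        simpa [jmpb] using hj
      have := ih (i+1) c (count+1) (by omega)
      simp only [triggerGBV, if_neg h4, this, hj, if_false, Bool.false_eq_true]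
      cases h : fjump vec (i+1) c with
      | none => rfl
      | some j => simp; ring

theorem nbfold (vec : List Int) :
    ∀ (k : Nat) (m c : Int) (s0 : Option Int) (acc : List (Option Int)),
    (m + 1).toNat = k → m < c → s0 = fjump vec (m+1) c →
    ((PySem.List.pyRange m (-1) (-1)).foldl
      (fun (st : Option Int × List (Option Int)) j =>
        let nxt := if 4 < |PySem.List.pyGetD vec j 0 - PySem.List.pyGetD vec (j+1) 0|
                   then some j else st.1
        (nxt, st.2 ++ [nxt])) (s0, acc)).2
    = acc ++ ((PySem.List.pyRange 0 (m+1) 1).map (fun j => fjump vec j c)).reverse := by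
  intro k
  induction k with
  | zero =>
    intro m c s0 acc hk _ _
    have hm : m ≤ -1 := by omega
    rw [PySem.List.pyRange_neg_one_eq_nil hm, PySem.List.pyRange_one_eq_nil (by omega : m + 1 ≤ 0)]
    simp
  | succ k ih =>
    intro m c s0 acc hk hmc hs0
    have hm : (-1 : Int) < m := by omega
    rw [PySem.List.pyRange_neg_one_cons hm]
    simp only [List.foldl_cons]
    have hnxt : (if 4 < |PySem.List.pyGetD vec m 0 - PySem.List.pyGetD vec (m+1) 0|
                 then some m else s0) = fjump vec m c := by
      rw [fjump_cons vec hmc, hs0]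
      by_cases h4 : 4 < |PySem.List.pyGetD vec m 0 - PySem.List.pyGetD vec (m+1) 0|
      · simp [h4, jmpb]
      · simp [h4, jmpb]
    rw [hnxt]
    have hk' : (m - 1 + 1).toNat = k := by omega
    have hmc' : m - 1 < c := by omega
    have hs0' : fjump vec m c = fjump vec (m - 1 + 1) c := by rw [show m - 1 + 1 = m by ring]
    rw [ih (m-1) c (fjump vec m c) (acc ++ [fjump vec m c]) hk' hmc' hs0']
    rw [show m - 1 + 1 = m by ring, PySem.List.pyRange_one_succ_right (show (0:Int) ≤ m by omega)]
    simp [List.append_assoc]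

theorem nb_eq (vec : List Int) :
    (((PySem.List.pyRange ((vec.length : Int) - 2) (-1) (-1)).foldl
      (fun (st : Option Int × List (Option Int)) j =>
        let nxt := if 4 < |PySem.List.pyGetD vec j 0 - PySem.List.pyGetD vec (j+1) 0|
                   then some j else st.1
        (nxt, st.2 ++ [nxt])) (none, [])).2).reverse
    = (PySem.List.pyRange 0 ((vec.length : Int) - 1) 1).map
        (fun j => fjump vec j ((vec.length : Int) - 1)) := by
  rw [nbfold vec ((vec.length : Int) - 2 + 1).toNat ((vec.length : Int) - 2)
      ((vec.length : Int) - 1) none [] rfl (by omega)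
      (by rw [show (vec.length : Int) - 2 + 1 = (vec.length : Int) - 1 by ring,
              fjump_nil vec (le_refl _)])]
  rw [show (vec.length : Int) - 2 + 1 = (vec.length : Int) - 1 by ring]
  simp

theorem get_bounds_variable_eq (white_values : List Int) :
    get_bounds_variable white_values = get_bounds_variable_alt white_values := by
  unfold get_bounds_variable get_bounds_variable_alt
  simp only []
  rw [nb_eq white_values]
  rw [PySem.List.foldl_congr_mem]
  intro st i hi
  have hmem := PySem.List.mem_pyRange_one.mp hi
  have hi0 : 0 ≤ i := hmem.1
  have hin : i < (white_values.length : Int) - 1 := hmem.2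
  rw [PySem.List.pyGetD_map_pyRange_of_nonneg _ _ _ _ hi0 hin]
  by_cases hskip : i < st.1
  · have : st.1 > -1 := by omega
    simp [hskip, this]
  · have hA : ¬ (st.1 > -1 ∧ i < st.1) := by tauto
    rw [if_neg hA, if_neg hskip]
    by_cases hr : 0 < PySem.List.pyGetD white_values i 0 ∧ PySem.List.pyGetD white_values i 0 < 10 ∧
        0 < PySem.List.pyGetD white_values (i+1) 0 ∧ PySem.List.pyGetD white_values (i+1) 0 < 10
    · have hrA : (PySem.List.pyGetD white_values i 0 < 10 ∧ 0 < PySem.List.pyGetD white_values i 0) ∧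
          (PySem.List.pyGetD white_values (i+1) 0 < 10 ∧ 0 < PySem.List.pyGetD white_values (i+1) 0) := by
        tauto
      have h10 : |PySem.List.pyGetD white_values i 0 - PySem.List.pyGetD white_values (i+1) 0| < 10 := by
        rw [abs_lt]; omega
      rw [if_pos hrA, if_pos hr, if_pos h10]
      rw [trig_eq white_values ((white_values.length : Int) - 1 - i).toNat i _ 0 rfl]
      cases h : fjump white_values i ((white_values.length : Int) - 1) with
      | none => simp
      | some j =>
        have hij : i ≤ j := fjump_ge white_values h
        have hne : j - i ≠ -1 := by omega
        simp only [zero_add]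
        rw [if_pos hne]
        simp [Int.add_comm]
    · have hrA : ¬ ((PySem.List.pyGetD white_values i 0 < 10 ∧ 0 < PySem.List.pyGetD white_values i 0) ∧
          (PySem.List.pyGetD white_values (i+1) 0 < 10 ∧ 0 < PySem.List.pyGetD white_values (i+1) 0)) := by
        tauto
      rw [if_neg hrA, if_neg hr]

-- ===== VERDICT (by name: the statement is the Claim_ definition above) =====
theorem get_bounds_variable_spec : Claim_equal_get_bounds_variable := by
  intro white_values _
  unfold Spec_get_bounds_variable
  exact get_bounds_variable_eq white_values
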